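-- pv_equiv track=rewrite | github.com/takdg123/XspecT | RefData/gbm/xspec/xspec.py | _model_unfolded_from_xspec
-- ===== SOURCE A (Python) =====
-- def _model_unfolded_from_xspec(ndets):
--     in_cmd1 = ''
--     in_cmd2 = ''
--     in_cmd3 = ''
--     in_cmd4 = ''
--     in_cmd5 = ''
--     out_cmd1 = ''
--     out_cmd2 = ''
--     out_cmd3 = ''
--     out_cmd4 = ''
--     out_cmd5 = ''
--     for i in range(ndets):
--         in_cmd1 += 'set model_uf_x{0} [tcloutr plot ufspec x {0}];'.format(i+1)
--         in_cmd2 += 'set model_uf_xerr{0} [tcloutr plot ufspec xerr {0}];'.format(i+1)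
--         in_cmd3 += 'set model_uf_y{0} [tcloutr plot ufspec y {0}];'.format(i+1)
--         in_cmd4 += 'set model_uf_yerr{0} [tcloutr plot ufspec yerr {0}];'.format(i+1)
--         in_cmd5 += 'set model_uf{0} [tcloutr plot ufspec model {0}];'.format(i+1)
--
--         out_cmd1 += 'echo $model_uf_x{0};'.format(i+1)
--         out_cmd2 += 'echo $model_uf_xerr{0};'.format(i+1)
--         out_cmd3 += 'echo $model_uf_y{0};'.format(i+1)
--         out_cmd4 += 'echo $model_uf_yerr{0};'.format(i+1)
--         out_cmd5 += 'echo $model_uf{0};'.format(i+1)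
--     return (in_cmd1+in_cmd2+in_cmd3+in_cmd4+in_cmd5,
--             out_cmd1+out_cmd2+out_cmd3+out_cmd4+out_cmd5)
-- ===== SOURCE B (Python) =====
-- def _model_unfolded_from_xspec(ndets):
--     # Data-driven rewrite: one table of (variable, tclout field) pairs, nested
--     # comprehensions (pairs outer, detectors inner) joined once -- no accumulators.
--     specs = [('model_uf_x', 'x'), ('model_uf_xerr', 'xerr'),
--              ('model_uf_y', 'y'), ('model_uf_yerr', 'yerr'),
--              ('model_uf', 'model')]
--     nums = [str(i + 1) for i in range(ndets)]
--     set_cmds = ''.join('set ' + var + n + ' [tcloutr plot ufspec ' + field + ' ' + n + '];'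
--                        for var, field in specs for n in nums)
--     echo_cmds = ''.join('echo $' + var + n + ';'
--                         for var, field in specs for n in nums)
--     return (set_cmds, echo_cmds)
-- ===== Notes on version B (the rewrite author's own statement) =====
-- stated objective: simpler
-- what changed: Replaced the single loop over ten string accumulators by a five-entry (variable, field) table with nested comprehensions (templates outer, detectors inner) joined once.
import Mathlib
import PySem

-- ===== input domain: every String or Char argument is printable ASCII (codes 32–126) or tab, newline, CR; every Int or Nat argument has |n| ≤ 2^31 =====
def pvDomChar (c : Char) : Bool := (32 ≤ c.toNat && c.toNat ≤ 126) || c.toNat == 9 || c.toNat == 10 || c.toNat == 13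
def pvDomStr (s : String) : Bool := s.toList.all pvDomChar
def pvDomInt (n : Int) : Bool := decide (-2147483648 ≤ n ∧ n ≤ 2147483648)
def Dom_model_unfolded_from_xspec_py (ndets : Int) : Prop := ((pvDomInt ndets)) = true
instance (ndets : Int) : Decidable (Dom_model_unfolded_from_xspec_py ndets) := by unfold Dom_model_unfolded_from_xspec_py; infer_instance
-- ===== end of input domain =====

-- B replaces A's single loop with ten string accumulators by a five-entry
-- (variable, field) table with nested loops (table outer, detectors inner),
-- joined once per output string; objective: simpler.


-- ===== PORT A =====
-- The ten accumulators in_cmd1..5/out_cmd1..5 are a 10-tuple of Strings;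
-- '….format(i+1)' is ported literally as the template's pieces concatenated
-- around PySem.Int.toStr (i+1) (exact: the templates contain only '{0}' fields).
def pvAccA : Type := String × String × String × String × String ×
                     String × String × String × String × String

-- the body of A's for-loop
def pvStepA (s : pvAccA) (i : Int) : pvAccA :=
  ( s.1 ++ ("set model_uf_x" ++ PySem.Int.toStr (i+1) ++ " [tcloutr plot ufspec x " ++ PySem.Int.toStr (i+1) ++ "];"),
    s.2.1 ++ ("set model_uf_xerr" ++ PySem.Int.toStr (i+1) ++ " [tcloutr plot ufspec xerr " ++ PySem.Int.toStr (i+1) ++ "];"),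
    s.2.2.1 ++ ("set model_uf_y" ++ PySem.Int.toStr (i+1) ++ " [tcloutr plot ufspec y " ++ PySem.Int.toStr (i+1) ++ "];"),
    s.2.2.2.1 ++ ("set model_uf_yerr" ++ PySem.Int.toStr (i+1) ++ " [tcloutr plot ufspec yerr " ++ PySem.Int.toStr (i+1) ++ "];"),
    s.2.2.2.2.1 ++ ("set model_uf" ++ PySem.Int.toStr (i+1) ++ " [tcloutr plot ufspec model " ++ PySem.Int.toStr (i+1) ++ "];"),
    s.2.2.2.2.2.1 ++ ("echo $model_uf_x" ++ PySem.Int.toStr (i+1) ++ ";"),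
    s.2.2.2.2.2.2.1 ++ ("echo $model_uf_xerr" ++ PySem.Int.toStr (i+1) ++ ";"),
    s.2.2.2.2.2.2.2.1 ++ ("echo $model_uf_y" ++ PySem.Int.toStr (i+1) ++ ";"),
    s.2.2.2.2.2.2.2.2.1 ++ ("echo $model_uf_yerr" ++ PySem.Int.toStr (i+1) ++ ";"),
    s.2.2.2.2.2.2.2.2.2 ++ ("echo $model_uf" ++ PySem.Int.toStr (i+1) ++ ";"))

def model_unfolded_from_xspec_py (ndets : Int) : String × String :=
  let st := (PySem.List.pyRange 0 ndets 1).foldl pvStepA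
    ("", "", "", "", "", "", "", "", "", "")
  (st.1 ++ st.2.1 ++ st.2.2.1 ++ st.2.2.2.1 ++ st.2.2.2.2.1,
   st.2.2.2.2.2.1 ++ st.2.2.2.2.2.2.1 ++ st.2.2.2.2.2.2.2.1 ++ st.2.2.2.2.2.2.2.2.1 ++ st.2.2.2.2.2.2.2.2.2)

-- ===== PORT B =====
def pvSpecs : List (String × String) :=
  [("model_uf_x", "x"), ("model_uf_xerr", "xerr"),
   ("model_uf_y", "y"), ("model_uf_yerr", "yerr"),
   ("model_uf", "model")]

def model_unfolded_from_xspec_py_alt (ndets : Int) : String × String :=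
  let nums := (PySem.List.pyRange 0 ndets 1).map (fun i => PySem.Int.toStr (i + 1))
  ( PySem.Str.join "" (pvSpecs.flatMap (fun p =>
      nums.map (fun n => "set " ++ p.1 ++ n ++ " [tcloutr plot ufspec " ++ p.2 ++ " " ++ n ++ "];"))),
    PySem.Str.join "" (pvSpecs.flatMap (fun p =>
      nums.map (fun n => "echo $" ++ p.1 ++ n ++ ";"))) )

-- ===== PRECONDITION & SPEC =====
def Spec_model_unfolded_from_xspec_py (ndets : Int) (out : String × String) : Prop := out = model_unfolded_from_xspec_py_alt ndets
instance (ndets : Int) (out : String × String) : Decidable (Spec_model_unfolded_from_xspec_py ndets out) := by unfold Spec_model_unfolded_from_xspec_py; infer_instance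

-- ===== CLAIM (what is proved, stated in full; the proofs are below) =====
def Claim_equal_model_unfolded_from_xspec_py : Prop := ∀ (ndets : Int), Dom_model_unfolded_from_xspec_py ndets → Spec_model_unfolded_from_xspec_py ndets (model_unfolded_from_xspec_py ndets)

-- ===== LEMMAS AND PROOFS =====

lemma join_empty_flatten (L : List (List Char)) : PySem.Chars.join [] L = L.flatten := by
  simp [PySem.Chars.join, List.intercalate]
  induction L with
  | nil => simp
  | cons a t ih => cases t <;> simp_all [List.intersperse]

lemma strJoin_empty (l : List String) :
    PySem.Str.join "" l = String.ofList ((l.map String.toList).flatten) := by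
  simp [PySem.Str.join, join_empty_flatten]

lemma strJoin_append (a b : List String) :
    PySem.Str.join "" (a ++ b) = PySem.Str.join "" a ++ PySem.Str.join "" b := by
  simp [strJoin_empty, String.ofList_append]

lemma strJoin_snoc (l : List String) (x : String) :
    PySem.Str.join "" (l ++ [x]) = PySem.Str.join "" l ++ x := by
  simp [strJoin_empty, String.ofList_append, String.ofList_toList]

-- the per-detector number string, as it appears after pyRange_one
def pvNum (k : Nat) : String := PySem.Int.toStr ((0 : Int) + k + 1)

-- the ten per-detector command strings of A, indexed by the range counter
def fA1 (k : Nat) : String := "set model_uf_x" ++ pvNum k ++ " [tcloutr plot ufspec x " ++ pvNum k ++ "];"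
def fA2 (k : Nat) : String := "set model_uf_xerr" ++ pvNum k ++ " [tcloutr plot ufspec xerr " ++ pvNum k ++ "];"
def fA3 (k : Nat) : String := "set model_uf_y" ++ pvNum k ++ " [tcloutr plot ufspec y " ++ pvNum k ++ "];"
def fA4 (k : Nat) : String := "set model_uf_yerr" ++ pvNum k ++ " [tcloutr plot ufspec yerr " ++ pvNum k ++ "];"
def fA5 (k : Nat) : String := "set model_uf" ++ pvNum k ++ " [tcloutr plot ufspec model " ++ pvNum k ++ "];"
def fA6 (k : Nat) : String := "echo $model_uf_x" ++ pvNum k ++ ";"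
def fA7 (k : Nat) : String := "echo $model_uf_xerr" ++ pvNum k ++ ";"
def fA8 (k : Nat) : String := "echo $model_uf_y" ++ pvNum k ++ ";"
def fA9 (k : Nat) : String := "echo $model_uf_yerr" ++ pvNum k ++ ";"
def fA10 (k : Nat) : String := "echo $model_uf" ++ pvNum k ++ ";"

-- one accumulator's final value: the join of its per-detector strings
def Jf (f : Nat → String) (n : Nat) : String :=
  PySem.Str.join "" ((List.range n).map f)

lemma Jf_zero (f : Nat → String) : Jf f 0 = "" := by
  simp [Jf, strJoin_empty]

lemma Jf_succ (f : Nat → String) (n : Nat) : Jf f (n + 1) = Jf f n ++ f n := by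
  simp [Jf, List.range_succ, strJoin_snoc]

-- A's fold computes the ten joins
lemma foldA (n : Nat) :
    ((List.range n).map (fun (k : Nat) => (0:Int) + (k : Int))).foldl pvStepA
      ("", "", "", "", "", "", "", "", "", "")
    = (Jf fA1 n, Jf fA2 n, Jf fA3 n, Jf fA4 n, Jf fA5 n,
       Jf fA6 n, Jf fA7 n, Jf fA8 n, Jf fA9 n, Jf fA10 n) := by
  induction n with
  | zero => simp [Jf_zero]
  | succ n ih =>
      rw [List.range_succ, List.map_append, List.foldl_append]
      simp only [List.map_cons, List.map_nil, List.foldl_cons, List.foldl_nil, ih]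
      simp only [Jf_succ, pvStepA, fA1, fA2, fA3, fA4, fA5, fA6, fA7, fA8, fA9, fA10, pvNum]

-- merging adjacent string literals inside a right-associated concatenation
lemma lit_merge {a b ab : String} (h : a ++ b = ab) (x : String) :
    a ++ (b ++ x) = ab ++ x := by rw [← String.append_assoc, h]

lemma fB1_eq (k : Nat) :
    "set " ++ "model_uf_x" ++ pvNum k ++ " [tcloutr plot ufspec " ++ "x" ++ " " ++ pvNum k ++ "];" = fA1 k := by
  simp only [fA1, String.append_assoc]
  rw [lit_merge (show ("set ":String) ++ "model_uf_x" = "set model_uf_x" by decide),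
      lit_merge (show (" [tcloutr plot ufspec ":String) ++ "x" = " [tcloutr plot ufspec x" by decide),
      lit_merge (show (" [tcloutr plot ufspec x":String) ++ " " = " [tcloutr plot ufspec x " by decide)]

lemma fB2_eq (k : Nat) :
    "set " ++ "model_uf_xerr" ++ pvNum k ++ " [tcloutr plot ufspec " ++ "xerr" ++ " " ++ pvNum k ++ "];" = fA2 k := by
  simp only [fA2, String.append_assoc]
  rw [lit_merge (show ("set ":String) ++ "model_uf_xerr" = "set model_uf_xerr" by decide),
      lit_merge (show (" [tcloutr plot ufspec ":String) ++ "xerr" = " [tcloutr plot ufspec xerr" by decide),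
      lit_merge (show (" [tcloutr plot ufspec xerr":String) ++ " " = " [tcloutr plot ufspec xerr " by decide)]

lemma fB3_eq (k : Nat) :
    "set " ++ "model_uf_y" ++ pvNum k ++ " [tcloutr plot ufspec " ++ "y" ++ " " ++ pvNum k ++ "];" = fA3 k := by
  simp only [fA3, String.append_assoc]
  rw [lit_merge (show ("set ":String) ++ "model_uf_y" = "set model_uf_y" by decide),
      lit_merge (show (" [tcloutr plot ufspec ":String) ++ "y" = " [tcloutr plot ufspec y" by decide),
      lit_merge (show (" [tcloutr plot ufspec y":String) ++ " " = " [tcloutr plot ufspec y " by decide)]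

lemma fB4_eq (k : Nat) :
    "set " ++ "model_uf_yerr" ++ pvNum k ++ " [tcloutr plot ufspec " ++ "yerr" ++ " " ++ pvNum k ++ "];" = fA4 k := by
  simp only [fA4, String.append_assoc]
  rw [lit_merge (show ("set ":String) ++ "model_uf_yerr" = "set model_uf_yerr" by decide),
      lit_merge (show (" [tcloutr plot ufspec ":String) ++ "yerr" = " [tcloutr plot ufspec yerr" by decide),
      lit_merge (show (" [tcloutr plot ufspec yerr":String) ++ " " = " [tcloutr plot ufspec yerr " by decide)]

lemma fB5_eq (k : Nat) :
    "set " ++ "model_uf" ++ pvNum k ++ " [tcloutr plot ufspec " ++ "model" ++ " " ++ pvNum k ++ "];" = fA5 k := by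
  simp only [fA5, String.append_assoc]
  rw [lit_merge (show ("set ":String) ++ "model_uf" = "set model_uf" by decide),
      lit_merge (show (" [tcloutr plot ufspec ":String) ++ "model" = " [tcloutr plot ufspec model" by decide),
      lit_merge (show (" [tcloutr plot ufspec model":String) ++ " " = " [tcloutr plot ufspec model " by decide)]

lemma fB6_eq (k : Nat) : "echo $" ++ "model_uf_x" ++ pvNum k ++ ";" = fA6 k := by
  simp only [fA6, String.append_assoc]
  rw [lit_merge (show ("echo $":String) ++ "model_uf_x" = "echo $model_uf_x" by decide)]

lemma fB7_eq (k : Nat) : "echo $" ++ "model_uf_xerr" ++ pvNum k ++ ";" = fA7 k := by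
  simp only [fA7, String.append_assoc]
  rw [lit_merge (show ("echo $":String) ++ "model_uf_xerr" = "echo $model_uf_xerr" by decide)]

lemma fB8_eq (k : Nat) : "echo $" ++ "model_uf_y" ++ pvNum k ++ ";" = fA8 k := by
  simp only [fA8, String.append_assoc]
  rw [lit_merge (show ("echo $":String) ++ "model_uf_y" = "echo $model_uf_y" by decide)]

lemma fB9_eq (k : Nat) : "echo $" ++ "model_uf_yerr" ++ pvNum k ++ ";" = fA9 k := by
  simp only [fA9, String.append_assoc]
  rw [lit_merge (show ("echo $":String) ++ "model_uf_yerr" = "echo $model_uf_yerr" by decide)]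

lemma fB10_eq (k : Nat) : "echo $" ++ "model_uf" ++ pvNum k ++ ";" = fA10 k := by
  simp only [fA10, String.append_assoc]
  rw [lit_merge (show ("echo $":String) ++ "model_uf" = "echo $model_uf" by decide)]

theorem main_eq (ndets : Int) :
    model_unfolded_from_xspec_py ndets = model_unfolded_from_xspec_py_alt ndets := by
  unfold model_unfolded_from_xspec_py model_unfolded_from_xspec_py_alt
  rw [PySem.List.pyRange_one]
  generalize (ndets - 0).toNat = n
  simp only [foldA]
  simp only [pvSpecs, List.flatMap_cons, List.flatMap_nil, List.append_nil, List.map_map,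
    strJoin_append]
  have h1 : (fun (k : Nat) => "set " ++ "model_uf_x" ++ PySem.Int.toStr ((0:Int) + (k:Int) + 1) ++ " [tcloutr plot ufspec " ++ "x" ++ " " ++ PySem.Int.toStr ((0:Int) + (k:Int) + 1) ++ "];") = fA1 := funext fun k => fB1_eq k
  have h2 : (fun (k : Nat) => "set " ++ "model_uf_xerr" ++ PySem.Int.toStr ((0:Int) + (k:Int) + 1) ++ " [tcloutr plot ufspec " ++ "xerr" ++ " " ++ PySem.Int.toStr ((0:Int) + (k:Int) + 1) ++ "];") = fA2 := funext fun k => fB2_eq k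
  have h3 : (fun (k : Nat) => "set " ++ "model_uf_y" ++ PySem.Int.toStr ((0:Int) + (k:Int) + 1) ++ " [tcloutr plot ufspec " ++ "y" ++ " " ++ PySem.Int.toStr ((0:Int) + (k:Int) + 1) ++ "];") = fA3 := funext fun k => fB3_eq k
  have h4 : (fun (k : Nat) => "set " ++ "model_uf_yerr" ++ PySem.Int.toStr ((0:Int) + (k:Int) + 1) ++ " [tcloutr plot ufspec " ++ "yerr" ++ " " ++ PySem.Int.toStr ((0:Int) + (k:Int) + 1) ++ "];") = fA4 := funext fun k => fB4_eq k
  have h5 : (fun (k : Nat) => "set " ++ "model_uf" ++ PySem.Int.toStr ((0:Int) + (k:Int) + 1) ++ " [tcloutr plot ufspec " ++ "model" ++ " " ++ PySem.Int.toStr ((0:Int) + (k:Int) + 1) ++ "];") = fA5 := funext fun k => fB5_eq k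
  have h6 : (fun (k : Nat) => "echo $" ++ "model_uf_x" ++ PySem.Int.toStr ((0:Int) + (k:Int) + 1) ++ ";") = fA6 := funext fun k => fB6_eq k
  have h7 : (fun (k : Nat) => "echo $" ++ "model_uf_xerr" ++ PySem.Int.toStr ((0:Int) + (k:Int) + 1) ++ ";") = fA7 := funext fun k => fB7_eq k
  have h8 : (fun (k : Nat) => "echo $" ++ "model_uf_y" ++ PySem.Int.toStr ((0:Int) + (k:Int) + 1) ++ ";") = fA8 := funext fun k => fB8_eq k
  have h9 : (fun (k : Nat) => "echo $" ++ "model_uf_yerr" ++ PySem.Int.toStr ((0:Int) + (k:Int) + 1) ++ ";") = fA9 := funext fun k => fB9_eq k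
  have h10 : (fun (k : Nat) => "echo $" ++ "model_uf" ++ PySem.Int.toStr ((0:Int) + (k:Int) + 1) ++ ";") = fA10 := funext fun k => fB10_eq k
  simp only [Function.comp_def]
  simp only [h1, h2, h3, h4, h5, h6, h7, h8, h9, h10]
  simp only [Jf]
  simp [String.append_assoc]

-- ===== VERDICT (by name: the statement is the Claim_ definition above) =====
theorem model_unfolded_from_xspec_py_spec : Claim_equal_model_unfolded_from_xspec_py := by
  intro ndets _
  unfold Spec_model_unfolded_from_xspec_py
  exact main_eq ndets
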